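-- pv_equiv track=rewrite | github.com/Danangjoyoo/flask-auto-swagger | flask_toolkits/routing.py | validate_rule_for_swagger
-- ===== SOURCE A (Python) =====
-- def validate_rule_for_swagger(rule: str):
--     opening_found = False
--     new_rule = ""
--     for i in range(len(rule)):
--         if not opening_found and rule[i] == "<":
--             opening_found = True
--             new_rule += "{"
--             continue
--         if opening_found and rule[i] == ">":
--             opening_found = False
--             new_rule += "}"
--             continue
--         new_rule += rule[i]
--     return new_rule
-- ===== SOURCE B (Python) =====
-- import re
--
--
-- def validate_rule_for_swagger(rule: str):
--     # Regex substitution: each '<' starts a segment running to the next '>' (or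
--     # end of string); '<' becomes '{' and a present '>' becomes '}'.
--     return re.sub(r"<([^>]*)(>?)",
--                   lambda m: "{" + m.group(1) + ("}" if m.group(2) else ""),
--                   rule)
-- ===== Notes on version B (the rewrite author's own statement) =====
-- stated objective: faster
-- what changed: Replaced the hand-written per-character loop with a boolean open-bracket flag by a single re.sub over the pattern <([^>]*)(>?), letting the C regex engine find each '<'-segment and rewrite it in one substitution.
import Mathlib
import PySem

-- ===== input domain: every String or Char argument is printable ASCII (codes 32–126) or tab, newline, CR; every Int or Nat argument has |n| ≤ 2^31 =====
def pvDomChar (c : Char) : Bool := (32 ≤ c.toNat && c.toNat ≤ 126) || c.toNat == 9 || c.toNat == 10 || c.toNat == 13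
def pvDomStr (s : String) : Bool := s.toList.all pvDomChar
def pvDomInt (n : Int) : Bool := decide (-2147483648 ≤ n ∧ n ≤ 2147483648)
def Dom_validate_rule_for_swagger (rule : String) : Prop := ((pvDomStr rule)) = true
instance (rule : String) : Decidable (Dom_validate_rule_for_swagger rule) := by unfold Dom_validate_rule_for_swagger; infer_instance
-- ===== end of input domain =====

-- B replaces A's char-by-char loop with a boolean flag by a regex-style
-- segment substitution ('<' up to the next '>' or end of string); objective: idiomatic.

-- ===== PORT A =====
-- state = (opening_found, new_rule as a char list); one fold step per loop iteration,
-- branches in A's order (string += is list append; exact on all inputs).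
def pvAStep (st : Bool × List Char) (c : Char) : Bool × List Char :=
  if !st.1 && (c = '<') then (true, st.2 ++ ['{'])
  else if st.1 && (c = '>') then (false, st.2 ++ ['}'])
  else (st.1, st.2 ++ [c])

def validate_rule_for_swagger (rule : String) : String :=
  String.ofList (rule.toList.foldl pvAStep (false, [])).2

-- ===== PORT B =====
-- port of Source B's re.sub r"<([^>]*)(>?)": outside a match, characters are copied; at
-- each '<', group 1 is the maximal run of non-'>' chars (takeWhile/dropWhile) and the
-- optional '>' becomes '}' when present; scanning resumes after the match.
mutual
def pvSub : List Char → List Char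
  | [] => []
  | c :: l =>
    if c = '<' then '{' :: pvMatchBody l
    else c :: pvSub l
termination_by l => l.length
decreasing_by all_goals simp

-- group 1 ++ the optional closing '>' rendered as '}', then the rest of the scan
def pvMatchBody (l : List Char) : List Char :=
  l.takeWhile (· ≠ '>') ++
    (if h : (l.dropWhile (· ≠ '>')).isEmpty then []
     else '}' :: pvSub (l.dropWhile (· ≠ '>')).tail)
termination_by l.length
decreasing_by
  simp only [List.length_tail]
  have h1 := List.length_dropWhile_le (fun x : Char => x ≠ '>') l
  have h2 : (l.dropWhile (· ≠ '>')).length ≠ 0 := by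
    intro hz
    rw [List.length_eq_zero_iff] at hz
    rw [hz] at h
    exact h rfl
  omega
end

def validate_rule_for_swagger_alt (rule : String) : String :=
  String.ofList (pvSub rule.toList)

-- ===== PRECONDITION & SPEC =====
def Spec_validate_rule_for_swagger (rule : String) (out : String) : Prop := out = validate_rule_for_swagger_alt rule
instance (rule : String) (out : String) : Decidable (Spec_validate_rule_for_swagger rule out) := by unfold Spec_validate_rule_for_swagger; infer_instance

-- ===== CLAIM (what is proved, stated in full; the proofs are below) =====
def Claim_equal_validate_rule_for_swagger : Prop := ∀ (rule : String), Dom_validate_rule_for_swagger rule → Spec_validate_rule_for_swagger rule (validate_rule_for_swagger rule)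

-- ===== LEMMAS AND PROOFS =====

theorem pvSub_nil : pvSub [] = [] := by rw [pvSub.eq_def]

theorem pvSub_cons (c : Char) (l : List Char) :
    pvSub (c :: l) = if c = '<' then '{' :: pvMatchBody l else c :: pvSub l := by
  rw [pvSub.eq_def]

theorem pvMatchBody_nil : pvMatchBody [] = [] := by unfold pvMatchBody; rfl

theorem pvMatchBody_cons_gt (l : List Char) :
    pvMatchBody ('>' :: l) = '}' :: pvSub l := by
  unfold pvMatchBody
  simp

theorem pvMatchBody_cons_ne (c : Char) (l : List Char) (h : c ≠ '>') :
    pvMatchBody (c :: l) = c :: pvMatchBody l := by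
  unfold pvMatchBody
  simp [h]

theorem pvMain (l : List Char) : ∀ (acc : List Char) (b : Bool),
    (l.foldl pvAStep (b, acc)).2 = acc ++ (if b then pvMatchBody l else pvSub l) := by
  induction l with
  | nil => intro acc b; cases b <;> simp [pvSub_nil, pvMatchBody_nil]
  | cons c l ih =>
    intro acc b
    cases b with
    | false =>
      by_cases hc : c = '<'
      · subst hc
        simp only [List.foldl_cons, pvAStep]
        rw [if_pos (by simp)]
        rw [ih]
        simp [pvSub_cons]
      · simp only [List.foldl_cons, pvAStep]
        rw [if_neg (by simp [hc]), if_neg (by simp)]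
        rw [ih]
        simp [pvSub_cons, hc]
    | true =>
      by_cases hc : c = '>'
      · subst hc
        simp only [List.foldl_cons, pvAStep]
        rw [if_neg (by simp), if_pos (by simp)]
        rw [ih]
        simp [pvMatchBody_cons_gt]
      · simp only [List.foldl_cons, pvAStep]
        rw [if_neg (by simp), if_neg (by simp [hc])]
        rw [ih]
        simp [pvMatchBody_cons_ne c l hc]

-- ===== VERDICT (by name: the statement is the Claim_ definition above) =====
theorem validate_rule_for_swagger_spec : Claim_equal_validate_rule_for_swagger := by
  intro rule _
  unfold Spec_validate_rule_for_swagger validate_rule_for_swagger validate_rule_for_swagger_alt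
  rw [pvMain]
  simp
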